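-- pv_equiv track=rewrite | github.com/connor-bechthold/leetcode2.0 | easy/backspace_string_compare.py | stackify
-- ===== SOURCE A (Python) =====
-- def stackify(word):
--     s = []
--     for letter in word:
--         if letter == '#' and len(s):
--             s.pop()
--         elif letter != '#':
--             s.append(letter)
--     return s
-- ===== SOURCE B (Python) =====
-- def stackify(word):
--     res = []
--     skip = 0
--     for letter in reversed(word):
--         if letter == '#':
--             skip += 1
--         elif skip:
--             skip -= 1
--         else:
--             res.append(letter)
--     res.reverse()
--     return res
-- ===== Notes on version B (the rewrite author's own statement) =====
-- stated objective: alternative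
-- what changed: Replaces the left-to-right stack with pop operations by a right-to-left scan keeping only an integer skip counter, appending survivors and reversing once at the end.
import Mathlib
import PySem

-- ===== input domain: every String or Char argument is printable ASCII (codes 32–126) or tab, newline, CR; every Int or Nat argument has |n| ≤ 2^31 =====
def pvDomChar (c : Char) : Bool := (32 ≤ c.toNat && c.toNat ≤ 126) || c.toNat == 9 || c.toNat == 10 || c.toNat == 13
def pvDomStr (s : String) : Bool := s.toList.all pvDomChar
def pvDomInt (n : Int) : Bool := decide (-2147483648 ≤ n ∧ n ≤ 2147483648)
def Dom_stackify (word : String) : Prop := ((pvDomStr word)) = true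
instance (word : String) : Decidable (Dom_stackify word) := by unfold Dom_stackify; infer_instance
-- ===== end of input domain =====

-- B replaces A's left-to-right stack (with pops) by a right-to-left scan with a skip counter; alternative decomposition, same cost.

-- ===== PORT A =====
-- left-to-right fold over the characters, maintaining the stack s
def stackify (word : String) : List String :=
  word.toList.foldl (fun s c =>
    if c = '#' ∧ s.length ≠ 0 then s.dropLast
    else if c ≠ '#' then s ++ [String.ofList [c]]
    else s) []

-- ===== PORT B =====
-- reverse scan with state (skip, res); res is reversed at the end
def stackify_alt (word : String) : List String :=
  (word.toList.reverse.foldl (fun (st : Nat × List String) c =>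
    if c = '#' then (st.1 + 1, st.2)
    else if st.1 > 0 then (st.1 - 1, st.2)
    else (st.1, st.2 ++ [String.ofList [c]])) (0, [])).2.reverse

-- ===== PRECONDITION & SPEC =====
def Spec_stackify (word : String) (out : List String) : Prop := out = stackify_alt word
instance (word : String) (out : List String) : Decidable (Spec_stackify word out) := by unfold Spec_stackify; infer_instance

-- ===== CLAIM (what is proved, stated in full; the proofs are below) =====
def Claim_equal_stackify : Prop := ∀ (word : String), Dom_stackify word → Spec_stackify word (stackify word)

-- ===== LEMMAS AND PROOFS =====

-- the reverse scan, taken out of the fold: result in collected (reversed-final) order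
def spin : List Char → Nat → List String
  | [], _ => []
  | c :: r, k =>
    if c = '#' then spin r (k+1)
    else if k > 0 then spin r (k-1)
    else String.ofList [c] :: spin r k

-- B's fold computes spin (second component)
theorem foldl_spin (r : List Char) : ∀ (k : Nat) (acc : List String),
    (r.foldl (fun (st : Nat × List String) c =>
      if c = '#' then (st.1 + 1, st.2)
      else if st.1 > 0 then (st.1 - 1, st.2)
      else (st.1, st.2 ++ [String.ofList [c]])) (k, acc)).2 = acc ++ spin r k := by
  induction r with
  | nil => intro k acc; simp [spin]
  | cons c r ih =>
    intro k acc
    by_cases h : c = '#'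
    · simp [spin, h, ih]
    · by_cases hk : k > 0
      · simp [spin, h, hk, ih]
      · simp [spin, h, hk, ih]

def stepA (s : List String) (c : Char) : List String :=
  if c = '#' ∧ s.length ≠ 0 then s.dropLast
  else if c ≠ '#' then s ++ [String.ofList [c]]
  else s

theorem stepA_hash (s : List String) : stepA s '#' = s.dropLast := by
  unfold stepA
  by_cases h : s.length ≠ 0 <;> simp [h]
  · cases s <;> simp_all

theorem spin_take (r : List Char) : ∀ (k : Nat),
    (spin r k).reverse =
      (r.reverse.foldl stepA []).take ((r.reverse.foldl stepA []).length - k) := by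
  induction r with
  | nil => intro k; simp [spin]
  | cons c r ih =>
    intro k
    have hfold : (c :: r).reverse.foldl stepA [] = stepA (r.reverse.foldl stepA []) c := by
      simp [List.foldl_append]
    set s' := r.reverse.foldl stepA [] with hs'
    by_cases h : c = '#'
    · subst h
      rw [show spin ('#' :: r) k = spin r (k+1) from by simp [spin]]
      rw [hfold, stepA_hash, ih]
      rw [List.dropLast_eq_take, List.take_take, List.length_take]
      congr 1
      omega
    · by_cases hk : k > 0
      · rw [show spin (c :: r) k = spin r (k-1) from by simp [spin, h, hk]]
        rw [ih, List.reverse_cons, List.foldl_append]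
        simp only [List.foldl_cons, List.foldl_nil, ← hs']
        rw [show stepA s' c = s' ++ [String.ofList [c]] from by simp [stepA, h]]
        rw [List.take_append]
        have h1 : s'.length + 1 - k - s'.length = 0 := by omega
        simp only [List.length_append, List.length_cons, List.length_nil, h1, List.take_zero,
          List.append_nil]
        congr 1
        omega
      · rw [show spin (c :: r) k = String.ofList [c] :: spin r k from by simp [spin, h, hk]]
        simp only [List.reverse_cons]
        rw [ih, List.foldl_append]
        simp only [List.foldl_cons, List.foldl_nil, ← hs']
        rw [show stepA s' c = s' ++ [String.ofList [c]] from by simp [stepA, h]]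
        have hk0 : k = 0 := by omega
        subst hk0
        simp

-- ===== VERDICT (by name: the statement is the Claim_ definition above) =====
theorem stackify_spec : Claim_equal_stackify := by
  intro word _
  unfold Spec_stackify stackify stackify_alt
  rw [foldl_spin]
  simp only [List.nil_append]
  have := spin_take word.toList.reverse 0
  simp only [List.reverse_reverse, Nat.sub_zero, List.take_length] at this
  rw [this]
  rfl
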